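-- pv_equiv track=rewrite | github.com/Steven-N/adventofcode2021 | day03/part1.py | compute
-- ===== SOURCE A (Python) =====
-- def compute(data):
--
--     lines = data.splitlines()
--     counts = [0] * len(lines[0])
--
--     for line in lines:
--         for i, c in enumerate(line):
--             if c == "1":
--                 counts[i] += 1
--
--     gamma = ""
--     eps = ""
--
--     for i in range(len(lines[0])):
--         if counts[i] > len(lines) // 2:
--             gamma += "1"
--             eps += "0"
--         else:
--             gamma += "0"
--             eps += "1"
--
--     return int(gamma, 2) * int(eps, 2)
-- ===== SOURCE B (Python) =====
-- def compute(data):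
--     lines = data.splitlines()
--     width = len(lines[0])
--     half = len(lines) // 2
--     gamma = 0
--     for i in range(width):
--         ones = sum(1 for line in lines if i < len(line) and line[i] == "1")
--         gamma = gamma * 2 + (1 if ones > half else 0)
--     eps = 2 ** width - 1 - gamma
--     return gamma * eps
-- ===== Notes on version B (the rewrite author's own statement) =====
-- stated objective: simpler
-- what changed: B replaces A's three passes (build a per-column count array row by row, then build gamma and epsilon as binary strings, then parse both with int(.,2)) by one arithmetic pass per column that counts the column's ones directly and accumulates gamma by shifting, deriving epsilon as the width-bit complement 2**width-1-gamma; no count array and no strings are built.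
import Mathlib
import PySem

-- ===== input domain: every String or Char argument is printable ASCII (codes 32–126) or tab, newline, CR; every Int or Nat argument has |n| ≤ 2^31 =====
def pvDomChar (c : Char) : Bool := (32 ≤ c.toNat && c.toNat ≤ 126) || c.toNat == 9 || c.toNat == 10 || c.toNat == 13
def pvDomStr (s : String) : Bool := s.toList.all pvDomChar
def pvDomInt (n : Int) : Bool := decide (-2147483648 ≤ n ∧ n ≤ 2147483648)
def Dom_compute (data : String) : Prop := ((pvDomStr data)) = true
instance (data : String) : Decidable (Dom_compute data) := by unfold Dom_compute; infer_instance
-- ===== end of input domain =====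

-- B merges A's count-array pass and its two output-string builds into one arithmetic pass per column
-- (gamma accumulated by shifting, epsilon as the width-bit complement); objective: simpler, same cost.

-- ===== PORT A =====
-- hand port of int(s, 2): exact on the nonempty '0'/'1' strings A's loop builds (0 on "", where Python raises; excluded by Pre_)
def pvBinVal (s : List Char) : Int :=
  s.foldl (fun a c => 2 * a + (if c = '1' then 1 else 0)) 0

-- counts[i] += 1; an out-of-range index makes `List.set` a no-op where Python raises IndexError (excluded by Pre_)
def pvStepA (cs : List Int) (p : Int × Char) : List Int :=
  if p.2 = '1' then cs.set p.1.toNat (cs.getD p.1.toNat 0 + 1) else cs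

def compute (data : String) : Int :=
  match PySem.Str.splitlines data with
  | [] => 0   -- lines[0] raises IndexError here (excluded by Pre_compute)
  | l0 :: rest =>
    let lines := l0 :: rest
    let counts :=
      lines.foldl (fun cs line => (PySem.List.enumerate line.toList 0).foldl pvStepA cs)
        (List.replicate l0.length (0 : Int))
    let ge := (PySem.List.pyRange 0 l0.length 1).foldl
      (fun (p : List Char × List Char) i =>
        if counts.getD i.toNat 0 > PySem.Int.floordiv (lines.length : Int) 2
        then (p.1 ++ ['1'], p.2 ++ ['0'])
        else (p.1 ++ ['0'], p.2 ++ ['1'])) ([], [])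
    pvBinVal ge.1 * pvBinVal ge.2

-- ===== PORT B =====
-- sum(1 for line in lines if i < len(line) and line[i] == "1")
def pvOnes (lines : List String) (i : Int) : Int :=
  lines.foldl (fun n line => n + (if PySem.List.pyGet? line.toList i = some '1' then 1 else 0)) 0

def compute_alt (data : String) : Int :=
  match PySem.Str.splitlines data with
  | [] => 0   -- lines[0] raises IndexError here too
  | l0 :: rest =>
    let lines := l0 :: rest
    let width := l0.length
    let half := PySem.Int.floordiv (lines.length : Int) 2
    let gamma := (PySem.List.pyRange 0 width 1).foldl
      (fun g i => g * 2 + (if pvOnes lines i > half then 1 else 0)) 0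
    let eps := (2 ^ width : Int) - 1 - gamma
    gamma * eps

-- ===== PRECONDITION & SPEC =====
-- Pre_ excludes exactly the inputs where A raises: no lines (IndexError), an empty first line
-- (int of an empty string is a ValueError), or a one-bit at a column ≥ len(lines[0]) (IndexError on counts[i]).
def Pre_compute (data : String) : Prop :=
  let lines := PySem.Str.splitlines data
  lines ≠ [] ∧ 0 < (lines.headD "").length ∧
    ∀ line ∈ lines, ∀ p ∈ PySem.List.enumerate line.toList 0,
      p.2 = '1' → p.1 < ((lines.headD "").length : Int)
instance (data : String) : Decidable (Pre_compute data) := by unfold Pre_compute; infer_instance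
def pvWitness_compute : String := "10\n01\n11"

def Spec_compute (data : String) (out : Int) : Prop := out = compute_alt data
instance (data : String) (out : Int) : Decidable (Spec_compute data out) := by unfold Spec_compute; infer_instance

-- ===== CLAIM (what is proved, stated in full; the proofs are below) =====
def Claim_equal_compute : Prop := ∀ (data : String), Dom_compute data → Pre_compute data → Spec_compute data (compute data)

-- ===== LEMMAS AND PROOFS =====

theorem pvBinVal_append (s : List Char) (c : Char) :
    pvBinVal (s ++ [c]) = 2 * pvBinVal s + (if c = '1' then 1 else 0) := by
  simp [pvBinVal, List.foldl_append]

theorem pvStepA_length (ps : List (Int × Char)) (cs : List Int) :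
    (ps.foldl pvStepA cs).length = cs.length := by
  induction ps generalizing cs with
  | nil => rfl
  | cons p ps ih =>
    simp only [List.foldl_cons]
    rw [ih]
    unfold pvStepA
    split <;> simp

theorem pvStepA_getD (l : List Char) (k : Nat) (cs : List Int) (i : Nat)
    (hok : ∀ p ∈ PySem.List.enumerate l (k : Int), p.2 = '1' → p.1 < (cs.length : Int)) :
    ((PySem.List.enumerate l (k : Int)).foldl pvStepA cs).getD i 0
      = cs.getD i 0 + (if k ≤ i ∧ l[i - k]? = some '1' then 1 else 0) := by
  induction l generalizing k cs with
  | nil => simp [PySem.List.enumerate_nil]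
  | cons c l ih =>
    have hcast : (k : Int) + 1 = ((k + 1 : Nat) : Int) := by push_cast; ring
    have hmem0 : ((k : Int), c) ∈ PySem.List.enumerate (c :: l) (k : Int) := by
      rw [PySem.List.enumerate_cons]; exact List.mem_cons_self
    have hlen : (pvStepA cs ((k : Int), c)).length = cs.length := by
      unfold pvStepA; split <;> simp
    have hok' : ∀ p ∈ PySem.List.enumerate l ((k + 1 : Nat) : Int),
        p.2 = '1' → p.1 < ((pvStepA cs ((k : Int), c)).length : Int) := by
      intro p hp h1
      rw [hlen]
      refine hok p ?_ h1
      rw [PySem.List.enumerate_cons]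
      exact List.mem_cons_of_mem _ (by rw [hcast]; exact hp)
    rw [PySem.List.enumerate_cons, List.foldl_cons, hcast, ih (k + 1) _ hok']
    by_cases hki : k ≤ i
    · by_cases hik : i = k
      · subst hik
        have hnot : ¬ (i + 1 ≤ i ∧ l[i - (i + 1)]? = some '1') := by omega
        have h0 : i - i = 0 := by omega
        rw [h0, List.getElem?_cons_zero]
        by_cases hc : c = '1'
        · subst hc
          have hk : i < cs.length := by
            have := hok _ hmem0 rfl
            simpa using this
          simp [pvStepA, List.getD_eq_getElem?_getD, hk]
        · simp [pvStepA, List.getD_eq_getElem?_getD, hc]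
      · have hne : k ≠ i := fun h => hik h.symm
        have h1 : i - k = (i - (k + 1)) + 1 := by omega
        rw [h1, List.getElem?_cons_succ]
        have h2 : (k + 1 ≤ i ∧ l[i - (k + 1)]? = some '1') ↔
            (k ≤ i ∧ l[i - (k + 1)]? = some '1') := by
          constructor <;> (rintro ⟨h, h'⟩; exact ⟨by omega, h'⟩)
        rw [if_congr h2 rfl rfl]
        congr 1
        by_cases hc : c = '1'
        · subst hc
          simp [pvStepA, List.getD_eq_getElem?_getD, hne]
        · simp [pvStepA, hc]
    · have h3 : ¬ (k + 1 ≤ i ∧ l[i - (k + 1)]? = some '1') := by omega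
      have h4 : ¬ (k ≤ i ∧ ((c :: l)[i - k]? = some '1')) := fun h => hki h.1
      rw [if_neg h3, if_neg h4]
      congr 1
      by_cases hc : c = '1'
      · subst hc
        have hne : k ≠ i := by omega
        simp [pvStepA, List.getD_eq_getElem?_getD, hne]
      · simp [pvStepA, hc]

theorem pvCol (lines : List String) (cs : List Int) (i : Nat)
    (hok : ∀ line ∈ lines, ∀ p ∈ PySem.List.enumerate line.toList 0,
      p.2 = '1' → p.1 < (cs.length : Int)) :
    (lines.foldl (fun cs line => (PySem.List.enumerate line.toList 0).foldl pvStepA cs) cs).getD i 0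
      = cs.getD i 0 + pvOnes lines (i : Int) := by
  induction lines generalizing cs with
  | nil => simp [pvOnes]
  | cons line rest ih =>
    have hz : ((0 : Nat) : Int) = 0 := rfl
    have hlen : ((PySem.List.enumerate line.toList 0).foldl pvStepA cs).length = cs.length :=
      pvStepA_length _ _
    have hok' : ∀ l' ∈ rest, ∀ p ∈ PySem.List.enumerate l'.toList 0, p.2 = '1' →
        p.1 < (((PySem.List.enumerate line.toList 0).foldl pvStepA cs).length : Int) := by
      intro l' hl' p hp h1
      rw [hlen]
      exact hok l' (List.mem_cons_of_mem _ hl') p hp h1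
    have hstep := pvStepA_getD line.toList 0 cs i (by
      rw [hz]; exact hok line List.mem_cons_self)
    rw [hz] at hstep
    simp only [List.foldl_cons]
    rw [ih _ hok', hstep]
    have hones : pvOnes (line :: rest) (i : Int)
        = (if PySem.List.pyGet? line.toList (i : Int) = some '1' then 1 else 0)
          + pvOnes rest (i : Int) := by
      simp only [pvOnes, List.foldl_cons, PySem.List.foldl_add, zero_add]
    rw [hones, PySem.List.pyGet?_natCast]
    have : (0 ≤ i ∧ line.toList[i - 0]? = some '1') ↔ line.toList[i]? = some '1' := by
      simp
    rw [if_congr this rfl rfl]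
    ring

theorem pvLoopCorr (b : Int → Prop) [DecidablePred b] (n : Nat) :
    pvBinVal (((PySem.List.pyRange 0 n 1).foldl
        (fun (p : List Char × List Char) i =>
          if b i then (p.1 ++ ['1'], p.2 ++ ['0']) else (p.1 ++ ['0'], p.2 ++ ['1'])) ([], [])).1)
      = (PySem.List.pyRange 0 n 1).foldl (fun g i => g * 2 + (if b i then 1 else 0)) 0
    ∧ pvBinVal (((PySem.List.pyRange 0 n 1).foldl
        (fun (p : List Char × List Char) i =>
          if b i then (p.1 ++ ['1'], p.2 ++ ['0']) else (p.1 ++ ['0'], p.2 ++ ['1'])) ([], [])).2)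
      = (2 ^ n : Int) - 1
        - (PySem.List.pyRange 0 n 1).foldl (fun g i => g * 2 + (if b i then 1 else 0)) 0 := by
  induction n with
  | zero =>
    norm_num [PySem.List.pyRange_one, pvBinVal]
  | succ n ih =>
    have hcast : ((n + 1 : Nat) : Int) = (n : Int) + 1 := by push_cast; ring
    rw [hcast, PySem.List.pyRange_one_succ_right (by positivity)]
    obtain ⟨h1, h2⟩ := ih
    by_cases hb : b (n : Int) <;>
      simp [List.foldl_append, hb, pvBinVal_append, h1, h2, pow_succ] <;>
      exact ⟨by ring, by ring⟩

-- ===== VERDICT (by name: the statement is the Claim_ definition above) =====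
theorem compute_spec : Claim_equal_compute := by
  intro data _ hpre
  unfold Spec_compute
  unfold Pre_compute at hpre
  cases h : PySem.Str.splitlines data with
  | nil => rw [h] at hpre; exact absurd rfl hpre.1
  | cons l0 rest =>
    rw [h] at hpre
    simp only [List.headD_cons] at hpre
    obtain ⟨-, -, hok⟩ := hpre
    simp only [compute, compute_alt, h]
    set L := l0 :: rest with hL
    set half := PySem.Int.floordiv (L.length : Int) 2 with hhalf
    set counts := L.foldl (fun cs line => (PySem.List.enumerate line.toList 0).foldl pvStepA cs)
      (List.replicate l0.length (0 : Int)) with hcounts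
    obtain ⟨hg, he⟩ := pvLoopCorr (fun i => counts.getD i.toNat 0 > half) l0.length
    rw [hg, he]
    have hfold : (PySem.List.pyRange 0 (l0.length : Int) 1).foldl
        (fun (g : Int) i => g * 2 + (if counts.getD i.toNat 0 > half then 1 else 0)) 0
        = (PySem.List.pyRange 0 (l0.length : Int) 1).foldl
        (fun (g : Int) i => g * 2 + (if pvOnes L i > half then 1 else 0)) 0 := by
      apply List.foldl_ext
      intro g i hi
      have hi' := (PySem.List.mem_pyRange_one).mp hi
      have hcnt : counts.getD i.toNat 0 = pvOnes L i := by
        have hcol := pvCol L (List.replicate l0.length (0 : Int)) i.toNat (by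
          simpa using hok)
        rw [← hcounts] at hcol
        have hiv : ((i.toNat : Nat) : Int) = i := by omega
        rw [hiv] at hcol
        simpa using hcol
      rw [hcnt]
    exact congrArg (fun g => g * ((2 : Int) ^ l0.length - 1 - g)) hfold
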